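-- pv_equiv track=rewrite | github.com/zaidsabih/Leetcode | 3637-trionic-array-i/3637-trionic-array-i.py | isTrionic
-- ===== SOURCE A (Python) =====
-- def isTrionic(nums):
--     n=len(nums)
--     i=0
--     while i+1<n and nums[i]<nums[i+1]:
--         i+=1
--     if i==0 or i==n-1:
--         return False
--     while i+1<n and nums[i]>nums[i+1]:
--         i+=1
--     if i==n-1:
--         return False
--     while i+1<n and nums[i]<nums[i+1]:
--         i+=1
--     return i ==n-1
-- ===== SOURCE B (Python) =====
-- def isTrionic(nums):
--     signs = [(a < b) - (a > b) for a, b in zip(nums, nums[1:])]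
--     runs = []
--     for s in signs:
--         if not runs or runs[-1] != s:
--             runs.append(s)
--     return runs == [1, -1, 1]
-- ===== Notes on version B (the rewrite author's own statement) =====
-- stated objective: alternative
-- what changed: Replaces the three sequential pointer-advancing while loops with a derived sequence of consecutive-difference signs compressed into adjacent-distinct runs, returning True iff the run list is exactly the up/down/up pattern.
import Mathlib
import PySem

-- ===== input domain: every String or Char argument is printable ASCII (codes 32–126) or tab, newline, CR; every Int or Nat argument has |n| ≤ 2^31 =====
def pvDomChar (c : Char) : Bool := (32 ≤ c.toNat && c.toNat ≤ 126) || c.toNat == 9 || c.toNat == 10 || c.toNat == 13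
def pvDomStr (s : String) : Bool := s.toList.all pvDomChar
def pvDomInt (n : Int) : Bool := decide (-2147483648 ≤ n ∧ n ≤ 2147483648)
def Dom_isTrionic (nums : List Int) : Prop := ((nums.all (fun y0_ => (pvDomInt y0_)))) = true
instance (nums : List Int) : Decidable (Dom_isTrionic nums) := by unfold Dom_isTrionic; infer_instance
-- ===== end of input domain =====

-- B re-implements the three pointer-advancing while loops as a difference-sign
-- sequence compressed into runs, compared with the pattern [1,-1,1]; same cost,
-- different decomposition.

-- ===== PORT A =====
-- the first and third 'while' of A are the same loop (strictly-increasing scan)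
def loopUpA (nums : List Int) (i : Nat) : Nat :=
  if h : i + 1 < nums.length ∧ nums[i]! < nums[i+1]! then loopUpA nums (i+1) else i
termination_by nums.length - i
decreasing_by omega

def loopDownA (nums : List Int) (i : Nat) : Nat :=
  if h : i + 1 < nums.length ∧ nums[i]! > nums[i+1]! then loopDownA nums (i+1) else i
termination_by nums.length - i
decreasing_by omega

def isTrionic (nums : List Int) : Bool :=
  let n : Int := nums.length
  let i1 := loopUpA nums 0
  if (i1 : Int) = 0 ∨ (i1 : Int) = n - 1 then false
  else
    let i2 := loopDownA nums i1
    if (i2 : Int) = n - 1 then false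
    else
      let i3 := loopUpA nums i2
      decide ((i3 : Int) = n - 1)

-- ===== PORT B =====
def isTrionic_alt (nums : List Int) : Bool :=
  let signs := (List.zip nums (nums.drop 1)).map
    (fun p => (if p.1 < p.2 then (1 : Int) else 0) - (if p.1 > p.2 then (1 : Int) else 0))
  let runs := signs.foldl
    (fun runs s => if runs = [] ∨ runs.getLast? ≠ some s then runs ++ [s] else runs) []
  decide (runs = [1, -1, 1])

-- ===== PRECONDITION & SPEC =====
def Spec_isTrionic (nums : List Int) (out : Bool) : Prop := out = isTrionic_alt nums
instance (nums : List Int) (out : Bool) : Decidable (Spec_isTrionic nums out) := by unfold Spec_isTrionic; infer_instance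

-- ===== CLAIM (what is proved, stated in full; the proofs are below) =====
def Claim_equal_isTrionic : Prop := ∀ (nums : List Int), Dom_isTrionic nums → Spec_isTrionic nums (isTrionic nums)

-- ===== LEMMAS AND PROOFS =====

-- sign of one adjacent pair, and the whole difference-sign sequence
def sgn (a b : Int) : Int := (if a < b then (1 : Int) else 0) - (if a > b then (1 : Int) else 0)

def sgns (nums : List Int) : List Int := List.zipWith sgn nums (nums.drop 1)

-- adjacent-run compression (the value B's fold computes)
def cmpF (c : Int) : List Int → List Int
  | [] => []
  | a :: l => if a = c then cmpF c l else a :: cmpF a l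

def rcomp : List Int → List Int
  | [] => []
  | a :: l => a :: cmpF a l

lemma sgn_eq_one (a b : Int) : sgn a b = 1 ↔ a < b := by
  unfold sgn; split_ifs <;> omega

lemma sgn_eq_negone (a b : Int) : sgn a b = -1 ↔ a > b := by
  unfold sgn; split_ifs <;> omega

lemma sgns_length (nums : List Int) : (sgns nums).length = nums.length - 1 := by
  simp [sgns]

lemma sgns_getElem (nums : List Int) (i : Nat) (h : i < (sgns nums).length) :
    (sgns nums)[i] = sgn nums[i]! nums[i+1]! := by
  have hl := sgns_length nums
  have h1 : i < nums.length := by omega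
  have h2 : i + 1 < nums.length := by omega
  simp [sgns, List.getElem_zipWith, getElem!_pos, h1, h2]

lemma loopUpA_eq (nums : List Int) (i : Nat) :
    loopUpA nums i = i + (((sgns nums).drop i).takeWhile (· = (1:Int))).length := by
  unfold loopUpA
  split
  · next h =>
    have hs : i < (sgns nums).length := by have := sgns_length nums; omega
    have hd : (sgns nums).drop i = (sgns nums)[i] :: (sgns nums).drop (i+1) :=
      List.drop_eq_getElem_cons hs
    have hone : (sgns nums)[i] = 1 := by
      rw [sgns_getElem nums i hs]; exact (sgn_eq_one _ _).2 h.2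
    rw [loopUpA_eq nums (i+1), hd, List.takeWhile_cons, hone]
    simp; omega
  · next h =>
    by_cases hb : i + 1 < nums.length
    · have hs : i < (sgns nums).length := by have := sgns_length nums; omega
      have hd : (sgns nums).drop i = (sgns nums)[i] :: (sgns nums).drop (i+1) :=
        List.drop_eq_getElem_cons hs
      have hne : (sgns nums)[i] ≠ 1 := by
        rw [sgns_getElem nums i hs]
        intro hc; exact h ⟨hb, (sgn_eq_one _ _).1 hc⟩
      rw [hd, List.takeWhile_cons]
      simp [hne]
    · have : (sgns nums).drop i = [] := by
        apply List.drop_eq_nil_of_le; have := sgns_length nums; omega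
      simp [this]
termination_by nums.length - i
decreasing_by omega

lemma loopDownA_eq (nums : List Int) (i : Nat) :
    loopDownA nums i = i + (((sgns nums).drop i).takeWhile (· = (-1:Int))).length := by
  unfold loopDownA
  split
  · next h =>
    have hs : i < (sgns nums).length := by have := sgns_length nums; omega
    have hd : (sgns nums).drop i = (sgns nums)[i] :: (sgns nums).drop (i+1) :=
      List.drop_eq_getElem_cons hs
    have hone : (sgns nums)[i] = -1 := by
      rw [sgns_getElem nums i hs]; exact (sgn_eq_negone _ _).2 h.2
    rw [loopDownA_eq nums (i+1), hd, List.takeWhile_cons, hone]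
    simp; omega
  · next h =>
    by_cases hb : i + 1 < nums.length
    · have hs : i < (sgns nums).length := by have := sgns_length nums; omega
      have hd : (sgns nums).drop i = (sgns nums)[i] :: (sgns nums).drop (i+1) :=
        List.drop_eq_getElem_cons hs
      have hne : (sgns nums)[i] ≠ -1 := by
        rw [sgns_getElem nums i hs]
        intro hc; exact h ⟨hb, (sgn_eq_negone _ _).1 hc⟩
      rw [hd, List.takeWhile_cons]
      simp [hne]
    · have : (sgns nums).drop i = [] := by
        apply List.drop_eq_nil_of_le; have := sgns_length nums; omega
      simp [this]
termination_by nums.length - i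
decreasing_by omega

-- B's fold computes adjacent-run compression
lemma foldl_cmpF (l : List Int) : ∀ (acc : List Int) (c : Int), acc.getLast? = some c →
    l.foldl (fun runs s => if runs = [] ∨ runs.getLast? ≠ some s then runs ++ [s] else runs) acc
      = acc ++ cmpF c l := by
  induction l with
  | nil => intro acc c h; simp [cmpF]
  | cons a l ih =>
    intro acc c h
    have hacc : acc ≠ [] := by intro he; simp [he] at h
    by_cases hca : a = c
    · subst hca
      simp only [List.foldl_cons, h, hacc]
      simp [cmpF, ih acc a h]
    · have hl : (acc ++ [a]).getLast? = some a := by simp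
      simp only [List.foldl_cons]
      rw [if_pos (by simp [h, Ne.symm hca])]
      rw [ih (acc ++ [a]) a hl]
      simp only [cmpF, if_neg hca, List.append_assoc, List.singleton_append]

lemma foldl_cmp (l : List Int) :
    l.foldl (fun runs s => if runs = [] ∨ runs.getLast? ≠ some s then runs ++ [s] else runs) []
      = rcomp l := by
  cases l with
  | nil => simp [rcomp]
  | cons a l =>
    rw [List.foldl_cons]
    have h1 : (if ([]:List Int) = [] ∨ ([]:List Int).getLast? ≠ some a then ([]:List Int) ++ [a] else []) = [a] := by simp
    rw [h1, foldl_cmpF l [a] a (by simp)]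
    simp [rcomp]

lemma cmpF_dropWhile : ∀ (l : List Int) (c : Int), cmpF c l = rcomp (l.dropWhile (· = c))
  | [], c => by simp [cmpF, rcomp]
  | a :: l, c => by
    by_cases h : a = c
    · subst h; simp [cmpF, List.dropWhile_cons, cmpF_dropWhile l a]
    · simp [cmpF, List.dropWhile_cons, h, rcomp]

lemma cmp_cons_dropWhile (a : Int) (l : List Int) :
    rcomp (a :: l) = a :: rcomp (l.dropWhile (· = a)) := by
  conv_lhs => rw [rcomp]
  rw [cmpF_dropWhile]

lemma head_dropWhile_ne (p : Int → Bool) (l : List Int) :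
    ∀ x, (l.dropWhile p).head? = some x → p x = false := by
  induction l with
  | nil => intro x h; simp at h
  | cons a l ih =>
    intro x h
    by_cases hp : p a
    · rw [List.dropWhile_cons_of_pos hp] at h; exact ih x h
    · rw [List.dropWhile_cons_of_neg hp] at h
      simp at h; subst h; simpa using hp

lemma zip_map_eq_sgns (nums : List Int) :
    (List.zip nums (nums.drop 1)).map
      (fun p => (if p.1 < p.2 then (1 : Int) else 0) - (if p.1 > p.2 then (1 : Int) else 0))
      = sgns nums := by
  simp only [sgns, List.zip, List.map_zipWith, List.drop_one]
  rfl

lemma rcomp_eq_nil (s : List Int) : rcomp s = [] ↔ s = [] := by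
  cases s with
  | nil => simp [rcomp]
  | cons a l => simp [rcomp]

lemma rcomp_eq_cons (s : List Int) (c : Int) (rest : List Int) :
    rcomp s = c :: rest ↔ s.head? = some c ∧ rcomp (s.dropWhile (· = c)) = rest := by
  cases s with
  | nil => simp [rcomp]
  | cons a l =>
    rw [cmp_cons_dropWhile]
    by_cases h : a = c
    · subst h
      simp [List.dropWhile_cons]
    · simp [List.dropWhile_cons, h]

-- rcomp s = [1,-1,1] unpacked into head/dropWhile conditions
lemma rcomp_triple (s : List Int) :
    rcomp s = [1, -1, 1] ↔
      s.head? = some 1 ∧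
      (s.dropWhile (· = (1:Int))).head? = some (-1) ∧
      ((s.dropWhile (· = (1:Int))).dropWhile (· = (-1:Int))).head? = some 1 ∧
      (((s.dropWhile (· = (1:Int))).dropWhile (· = (-1:Int))).dropWhile (· = (1:Int))) = [] := by
  rw [rcomp_eq_cons, rcomp_eq_cons, rcomp_eq_cons, rcomp_eq_nil]

-- heads of takeWhile/dropWhile decompositions
lemma takeWhile_nil_iff (p : Int → Bool) (s : List Int) :
    s.takeWhile p = [] ↔ ∀ a, s.head? = some a → p a = false := by
  cases s with
  | nil => simp
  | cons a l =>
    rw [List.takeWhile_cons]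
    by_cases h : p a <;> simp [h]

lemma len_split (p : Int → Bool) (s : List Int) :
    (s.takeWhile p).length + (s.dropWhile p).length = s.length := by
  induction s with
  | nil => simp
  | cons a l ih =>
    by_cases h : p a
    · simp only [List.takeWhile_cons_of_pos h, List.dropWhile_cons_of_pos h, List.length_cons]
      omega
    · simp [List.takeWhile_cons_of_neg h, List.dropWhile_cons_of_neg h]

lemma drop_takeWhile (p : Int → Bool) : ∀ (s : List Int),
    s.drop (s.takeWhile p).length = s.dropWhile p
  | [] => by simp
  | a :: l => by
    by_cases h : p a
    · simp [List.takeWhile_cons, List.dropWhile_cons, h, drop_takeWhile p l]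
    · simp [List.takeWhile_cons, List.dropWhile_cons, h]

-- main characterisation on the sign list
lemma main_iff (nums : List Int) : isTrionic nums = isTrionic_alt nums := by
  have halt : isTrionic_alt nums = decide (rcomp (sgns nums) = [1, -1, 1]) := by
    simp only [isTrionic_alt, zip_map_eq_sgns, foldl_cmp]
  rw [halt]
  -- abbreviations
  set s := sgns nums with hs
  set t1 := s.takeWhile (· = (1:Int)) with ht1
  set u := s.dropWhile (· = (1:Int)) with hu
  set t2 := u.takeWhile (· = (-1:Int)) with ht2
  set v := u.dropWhile (· = (-1:Int)) with hv
  set t3 := v.takeWhile (· = (1:Int)) with ht3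
  set w := v.dropWhile (· = (1:Int)) with hw
  have hlen : s.length = nums.length - 1 := sgns_length nums
  have h1 : loopUpA nums 0 = t1.length := by
    rw [loopUpA_eq, List.drop_zero, ← hs, ← ht1]; omega
  have hdu : s.drop t1.length = u := drop_takeWhile _ _
  have h2 : loopDownA nums t1.length = t1.length + t2.length := by
    rw [loopDownA_eq, ← hs, hdu, ← ht2]
  have hdv : s.drop (t1.length + t2.length) = v := by
    rw [← List.drop_drop, hdu, ht2, hv]; exact drop_takeWhile _ _
  have h3 : loopUpA nums (t1.length + t2.length) = t1.length + t2.length + t3.length := by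
    rw [loopUpA_eq, ← hs, hdv, ← ht3]
  have l1 : t1.length + u.length = s.length := len_split _ _
  have l2 : t2.length + v.length = u.length := len_split _ _
  have l3 : t3.length + w.length = v.length := len_split _ _
  unfold isTrionic
  rw [h1]
  by_cases hc1 : (t1.length : Int) = 0 ∨ (t1.length : Int) = (nums.length : Int) - 1
  · rw [if_pos hc1]
    symm
    rw [decide_eq_false_iff_not, rcomp_triple, ← hu]
    rintro ⟨hh1, hh2, -, -⟩
    -- s starts with 1, so t1 ≠ [] and s ≠ []
    have hsne : s ≠ [] := by intro h; rw [h] at hh1; simp at hh1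
    have ht1ne : t1 ≠ [] := by
      intro h
      have := (takeWhile_nil_iff _ s).1 (ht1 ▸ h) 1 hh1
      simp at this
    have hn1 : 1 ≤ nums.length := by
      rcases nums with _ | _ <;> simp_all [sgns]
    rcases hc1 with hc | hc
    · exact ht1ne (List.length_eq_zero_iff.1 (by exact_mod_cast hc))
    · -- t1 is all of s, so u = [] contradicting u.head? = some (-1)
      have : t1.length = s.length := by omega
      have hun : u = [] := List.length_eq_zero_iff.1 (by omega)
      rw [hun] at hh2; simp at hh2
  · rw [if_neg hc1]
    push_neg at hc1
    obtain ⟨hne0, hnen⟩ := hc1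
    have ht1ne : t1 ≠ [] := by
      intro h; exact hne0 (by simp [h])
    have hsne : s ≠ [] := by
      intro h
      apply ht1ne
      rw [ht1, h]; rfl
    have hh1 : s.head? = some 1 := by
      rcases hse : s with _ | ⟨a, l⟩
      · exact absurd hse hsne
      · rw [ht1, hse, List.takeWhile_cons] at ht1ne
        by_cases ha : a = (1:Int)
        · simp [hse, ha]
        · simp [ha] at ht1ne
    have hn1 : 1 ≤ nums.length := by
      rcases nums with _ | _ <;> simp_all [sgns]
    have hslen : s.length = nums.length - 1 := hlen
    have hune : u ≠ [] := by
      intro h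
      apply hnen
      have : u.length = 0 := by rw [h]; rfl
      have : t1.length = s.length := by omega
      rw [this, hslen]
      omega
    rw [h2]
    by_cases hc2 : ((t1.length + t2.length : Nat) : Int) = (nums.length : Int) - 1
    · rw [if_pos hc2]
      symm
      rw [decide_eq_false_iff_not, rcomp_triple, ← hu, ← hv]
      rintro ⟨-, -, hh3, -⟩
      have : t1.length + t2.length = s.length := by omega
      have hvn : v = [] := List.length_eq_zero_iff.1 (by omega)
      rw [hvn] at hh3; simp at hh3
    · rw [if_neg hc2]
      rw [h3]
      have hvne : v ≠ [] := by
        intro h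
        apply hc2
        have : v.length = 0 := by rw [h]; rfl
        have : t1.length + t2.length = s.length := by omega
        rw [this, hslen]
        omega
      rw [decide_eq_decide, rcomp_triple, ← hu, ← hv, ← hw]
      constructor
      · intro heq
        have hsum : t1.length + t2.length + t3.length = s.length := by
          rw [hslen]; omega
        have hwn : w = [] := List.length_eq_zero_iff.1 (by omega)
        have hvall : ∀ x ∈ v, x = 1 := by
          intro x hx
          have := (List.dropWhile_eq_nil_iff).1 (hw ▸ hwn) x hx
          simpa using this
        have hh3 : v.head? = some 1 := by
          obtain ⟨c, k, hck⟩ := List.exists_cons_of_ne_nil hvne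
          have hc : c = 1 := hvall c (by rw [hck]; exact List.mem_cons_self)
          rw [hck, hc]; rfl
        have hh2 : u.head? = some (-1) := by
          obtain ⟨b, m, hbm'⟩ := List.exists_cons_of_ne_nil hune
          have hb1 : ¬ (b = (1:Int)) := by
            have := head_dropWhile_ne (· = (1:Int)) s b (by rw [← hu, hbm']; rfl)
            simpa using this
          by_cases hbm : b = (-1 : Int)
          · rw [hbm', hbm]; rfl
          · -- then v = u and v's head is 1, contradiction
            have hvu : v = u := by
              rw [hv, hbm', List.dropWhile_cons_of_neg (by simpa using hbm)]
            rw [hvu, hbm'] at hh3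
            simp at hh3
            exact absurd hh3 hb1
        exact ⟨hh1, hh2, hh3, hwn⟩
      · rintro ⟨-, -, -, hwn⟩
        have hw0 : w.length = 0 := by rw [hwn]; rfl
        omega


-- ===== VERDICT (by name: the statement is the Claim_ definition above) =====
theorem isTrionic_spec : Claim_equal_isTrionic := by
  intro nums _
  unfold Spec_isTrionic
  exact main_iff nums
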